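-- pv_equiv track=rewrite | github.com/Bennyhwanggggg/Algorithm-and-Data-Structures-and-Coding-Challenges | Challenges/stringWithout3IdenticalConsecutiveLetters.py | solution
-- ===== SOURCE A (Python) =====
-- def solution(string):
-- 	i = 0
-- 	moves = 0
-- 	while i < len(string):
-- 		run_length = 1
-- 		while i + 1 < len(string) and string[i] == string[i+1]:
-- 			i += 1
-- 			run_length += 1
-- 		moves += run_length // 3
-- 		i += 1
--
-- 	return moves
-- ===== SOURCE B (Python) =====
-- def solution(string):
--     moves = 0
--     streak = 0
--     prev = None
--     for c in string:
--         if c == prev: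
--             streak += 1
--         else:
--             prev = c
--             streak = 1
--         if streak == 3:
--             moves += 1
--             streak = 0
--     return moves
-- ===== Notes on version B (the rewrite author's own statement) =====
-- stated objective: simpler
-- what changed: Replaced the nested while-loop that materializes each maximal run's length with a single flat pass keeping a previous-character/streak counter that resets modularly at 3.
import Mathlib
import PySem

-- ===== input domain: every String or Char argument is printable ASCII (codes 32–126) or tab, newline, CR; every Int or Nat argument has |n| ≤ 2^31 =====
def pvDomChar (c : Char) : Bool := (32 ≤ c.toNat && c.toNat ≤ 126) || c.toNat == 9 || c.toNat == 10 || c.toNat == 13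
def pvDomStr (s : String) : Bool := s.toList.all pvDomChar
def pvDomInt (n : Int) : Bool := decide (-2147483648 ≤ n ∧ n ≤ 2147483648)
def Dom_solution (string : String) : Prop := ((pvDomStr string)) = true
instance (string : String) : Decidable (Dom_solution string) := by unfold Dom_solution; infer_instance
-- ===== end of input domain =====

-- B replaces A's nested run-length while-loops with one flat pass over the characters
-- maintaining a previous-character/streak counter that resets at 3 (objective: simpler).

-- ===== PORT A =====
-- inner while loop: advances past consecutive characters equal to c, counting them into n;
-- returns the final run_length and the rest of the string after the run
def pvCountRun (c : Char) (n : Int) : List Char → Int × List Char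
  | [] => (n, [])
  | d :: rs => if d = c then pvCountRun c (n + 1) rs else (n, d :: rs)

theorem pvCountRun_len (c : Char) (n : Int) (cs : List Char) :
    (pvCountRun c n cs).2.length ≤ cs.length := by
  induction cs generalizing n with
  | nil => simp [pvCountRun]
  | cons d rs ih =>
    simp only [pvCountRun]
    split
    · exact Nat.le_trans (ih _) (Nat.le_succ _)
    · simp

-- outer while loop over the string
def pvALoop : List Char → Int
  | [] => 0
  | c :: rest =>
    let p := pvCountRun c 1 rest
    PySem.Int.floordiv p.1 3 + pvALoop p.2
termination_by cs => cs.length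
decreasing_by
  exact Nat.lt_succ_of_le (pvCountRun_len c 1 rest)

def solution (string : String) : Int := pvALoop string.toList

-- ===== PORT B =====
-- one loop step: state = (prev, streak, moves)
def pvBStep (st : Option Char × Int × Int) (c : Char) : Option Char × Int × Int :=
  let streak' := if st.1 = some c then st.2.1 + 1 else 1
  if streak' = 3 then (some c, 0, st.2.2 + 1) else (some c, streak', st.2.2)

def solution_alt (string : String) : Int :=
  (string.toList.foldl pvBStep (none, 0, 0)).2.2

-- ===== PRECONDITION & SPEC =====
def Spec_solution (string : String) (out : Int) : Prop := out = solution_alt string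
instance (string : String) (out : Int) : Decidable (Spec_solution string out) := by unfold Spec_solution; infer_instance

-- ===== CLAIM (what is proved, stated in full; the proofs are below) =====
def Claim_equal_solution : Prop := ∀ (string : String), Dom_solution string → Spec_solution string (solution string)

-- ===== LEMMAS AND PROOFS =====

-- pvCountRun splits its input into a run of its first char plus a rest not starting with it
theorem pvCountRun_char (cs : List Char) (c : Char) (n : Int) :
    ∃ (k : ℕ) (rs : List Char), cs = List.replicate k c ++ rs ∧
      pvCountRun c n cs = (n + k, rs) ∧ (∀ h, rs.head? = some h → h ≠ c) := by
  induction cs generalizing n with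
  | nil => exact ⟨0, [], by simp [pvCountRun]⟩
  | cons d rs ih =>
    by_cases hd : d = c
    · obtain ⟨k, rs', h1, h2, h3⟩ := ih (n + 1)
      refine ⟨k + 1, rs', ?_, ?_, h3⟩
      · simp [hd, List.replicate_succ, h1]
      · simp only [pvCountRun, hd, h2]
        simp only [if_true]
        refine Prod.ext ?_ rfl
        push_cast; ring
    · exact ⟨0, d :: rs, by simp, by simp [pvCountRun, hd], by simp [hd]⟩

-- folding pvBStep over a run of k copies of c, with prev = c and streak s ∈ [0,3)
theorem pvFold_replicate (k : ℕ) (c : Char) (s m : Int) (h0 : 0 ≤ s) (h3 : s < 3) :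
    List.foldl pvBStep (some c, s, m) (List.replicate k c) =
      (some c, (s + k) % 3, m + (s + k) / 3) := by
  induction k generalizing s m with
  | zero => simp; omega
  | succ k ih =>
    rw [List.replicate_succ, List.foldl_cons]
    by_cases hs : s + 1 = 3
    · have : pvBStep (some c, s, m) c = (some c, 0, m + 1) := by
        simp [pvBStep, hs]
      rw [this, ih 0 (m + 1) le_rfl (by omega)]
      refine congrArg _ (Prod.ext ?_ ?_) <;> push_cast <;> omega
    · have : pvBStep (some c, s, m) c = (some c, s + 1, m) := by
        simp [pvBStep, hs]
      rw [this, ih (s + 1) m (by omega) (by omega)]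
      refine congrArg _ (Prod.ext ?_ ?_) <;> push_cast <;> omega

-- main invariant: starting from any state whose prev does not match the next character,
-- the flat fold adds exactly pvALoop cs to moves
theorem pvFold_eq_aLoop (cs : List Char) (prev : Option Char) (s m : Int)
    (hp : ∀ h, cs.head? = some h → prev ≠ some h) :
    (List.foldl pvBStep (prev, s, m) cs).2.2 = m + pvALoop cs := by
  induction hn : cs.length using Nat.strong_induction_on generalizing cs prev s m with
  | _ n ih =>
    match cs with
    | [] => simp [pvALoop]
    | c :: rest =>
      obtain ⟨k, rs, hsplit, hcount, hhead⟩ := pvCountRun_char rest c 1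
      have hne : prev ≠ some c := hp c (by simp)
      have hstep : pvBStep (prev, s, m) c = (some c, 1, m) := by
        simp [pvBStep, hne]
      rw [List.foldl_cons, hstep, hsplit, List.foldl_append,
        pvFold_replicate k c 1 m (by omega) (by omega)]
      have hrs : (List.foldl pvBStep (some c, (1 + k) % 3, m + (1 + k) / 3) rs).2.2
          = m + (1 + (k : Int)) / 3 + pvALoop rs := by
        refine ih rs.length ?_ rs (some c) _ _ ?_ rfl
        · subst hn hsplit; simp
        · intro h hh hcontr
          exact hhead h hh (Option.some.inj hcontr).symm
      have hcount' : pvCountRun c 1 (List.replicate k c ++ rs) = (1 + (k : Int), rs) :=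
        hsplit ▸ hcount
      rw [hrs]
      simp only [pvALoop, hcount']
      rw [PySem.Int.floordiv_eq_ediv_of_pos (by norm_num)]
      ring

-- ===== VERDICT (by name: the statement is the Claim_ definition above) =====
theorem solution_spec : Claim_equal_solution := by
  intro s _
  show solution s = solution_alt s
  unfold solution solution_alt
  rw [pvFold_eq_aLoop s.toList none 0 0 (by simp)]
  ring
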